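-- pv_equiv track=rewrite | github.com/shigashiyama/ent_tools | ent_tools/ent_tools/data_conversion/brat_util.py | _get_idx_sets_to_be_merged
-- ===== SOURCE A (Python) =====
-- def _get_idx_sets_to_be_merged(
--         clusters: list[list],
-- ) -> list[set]:
--
--     to_be_merged = []
--     for i, cls1 in enumerate(clusters):
--         for j, cls2 in enumerate(clusters):
--             if i < j:
--                 if set(cls1) & set(cls2):
--                     flag_add = False
--                     for idx_set in to_be_merged:
--                         if i in idx_set:
--                             idx_set.add(j)
--                             flag_add = True
--                             break
--
--                         elif j in idx_set:
--                             idx_set.add(i)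
--                             flag_add = True
--                             break
--
--                     if not flag_add:
--                         to_be_merged.append(set([i, j]))
--
--     return to_be_merged
-- ===== SOURCE B (Python) =====
-- def _get_idx_sets_to_be_merged(
--         clusters: list[list],
-- ) -> list[set]:
--
--     # inverted index: element -> indices of clusters containing it (increasing)
--     elem_to_idxs = {}
--     for i, cls in enumerate(clusters):
--         for e in set(cls):
--             elem_to_idxs.setdefault(e, []).append(i)
--
--     # every overlapping pair (i, j) with i < j, each exactly once
--     pairs = set()
--     for idxs in elem_to_idxs.values():
--         for a, x in enumerate(idxs):
--             for y in idxs[a + 1:]: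
--                 pairs.add((x, y))
--
--     n = len(clusters)
--     to_be_merged = []
--     for i, j in sorted(pairs, key=lambda p: p[0] * n + p[1]):
--         flag_add = False
--         for idx_set in to_be_merged:
--             if i in idx_set:
--                 idx_set.add(j)
--                 flag_add = True
--                 break
--             elif j in idx_set:
--                 idx_set.add(i)
--                 flag_add = True
--                 break
--         if not flag_add:
--             to_be_merged.append(set([i, j]))
--
--     return to_be_merged
-- ===== Notes on version B (the rewrite author's own statement) =====
-- stated objective: faster
-- what changed: Replaces A's O(n^2) all-pairs set-intersection scan by an inverted index from element to cluster indices, enumerates only the actually co-occurring index pairs, sorts them into A's visiting order and replays the same merge loop.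
import Mathlib
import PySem

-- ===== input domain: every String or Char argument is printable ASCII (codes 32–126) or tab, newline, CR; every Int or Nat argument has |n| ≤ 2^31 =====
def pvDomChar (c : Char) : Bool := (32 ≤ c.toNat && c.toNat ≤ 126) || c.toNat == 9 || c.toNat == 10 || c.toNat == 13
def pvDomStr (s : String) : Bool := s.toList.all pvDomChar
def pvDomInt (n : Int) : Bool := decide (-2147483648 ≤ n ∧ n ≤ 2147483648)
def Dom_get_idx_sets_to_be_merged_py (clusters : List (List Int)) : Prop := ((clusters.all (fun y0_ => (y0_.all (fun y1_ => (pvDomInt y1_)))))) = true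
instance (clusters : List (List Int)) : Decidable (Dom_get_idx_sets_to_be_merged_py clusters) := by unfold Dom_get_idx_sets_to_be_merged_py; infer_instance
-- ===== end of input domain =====

-- B replaces A's all-pairs overlap scan by an inverted index (element -> cluster indices),
-- enumerates only co-occurring index pairs, sorts them and replays the same merge loop.

-- ===== PORT A =====
-- the inner 'for idx_set in to_be_merged: … break / append' loop, shared verbatim by A and B
def pvMergeStep (acc : List (List Int)) (i j : Int) : List (List Int) :=
  match acc with
  | [] => [PySem.Set.ofList [i, j]]
  | s :: rest =>
    if PySem.Set.contains s i then PySem.Set.add s j :: rest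
    else if PySem.Set.contains s j then PySem.Set.add s i :: rest
    else s :: pvMergeStep rest i j

def get_idx_sets_to_be_merged_py (clusters : List (List Int)) : List (List Int) :=
  (PySem.List.enumerate clusters).foldl (fun acc ic =>
    (PySem.List.enumerate clusters).foldl (fun acc jc =>
      if ic.1 < jc.1 then
        if PySem.Set.inter (PySem.Set.ofList ic.2) jc.2 ≠ [] then pvMergeStep acc ic.1 jc.1
        else acc
      else acc) acc) []

-- ===== PORT B =====
def get_idx_sets_to_be_merged_py_alt (clusters : List (List Int)) : List (List Int) :=
  -- inverted index: element -> indices of clusters containing it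
  let elem_to_idxs : PySem.Dict Int (List Int) :=
    (PySem.List.enumerate clusters).foldl (fun d ic =>
      (PySem.Set.ofList ic.2).foldl (fun d e => d.modify e [] (· ++ [ic.1])) d) PySem.Dict.empty
  -- every overlapping pair (i, j) with i < j, each exactly once
  let pairs : PySem.Set (Int × Int) :=
    elem_to_idxs.values.foldl (fun ps idxs =>
      (PySem.List.enumerate idxs).foldl (fun ps ax =>
        (PySem.List.slice idxs (some (ax.1 + 1)) none).foldl (fun ps y => PySem.Set.add ps (ax.2, y)) ps) ps)
      PySem.Set.empty
  let n : Int := clusters.length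
  (PySem.List.sorted pairs (fun p => p.1 * n + p.2)).foldl (fun acc p => pvMergeStep acc p.1 p.2) []

-- ===== PRECONDITION & SPEC =====
def Spec_get_idx_sets_to_be_merged_py (clusters : List (List Int)) (out : List (List Int)) : Prop := out = get_idx_sets_to_be_merged_py_alt clusters
instance (clusters : List (List Int)) (out : List (List Int)) : Decidable (Spec_get_idx_sets_to_be_merged_py clusters out) := by unfold Spec_get_idx_sets_to_be_merged_py; infer_instance

-- ===== CLAIM (what is proved, stated in full; the proofs are below) =====
def Claim_equal_get_idx_sets_to_be_merged_py : Prop := ∀ (clusters : List (List Int)), Dom_get_idx_sets_to_be_merged_py clusters → Spec_get_idx_sets_to_be_merged_py clusters (get_idx_sets_to_be_merged_py clusters)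

-- ===== LEMMAS AND PROOFS =====

-- the overlapping pairs (i, j), i < j, in the lexicographic order A visits them
def pvPairList (clusters : List (List Int)) : List (Int × Int) :=
  (PySem.List.enumerate clusters).flatMap (fun ic =>
    ((PySem.List.enumerate clusters).filter (fun jc =>
      decide (ic.1 < jc.1 ∧ PySem.Set.inter (PySem.Set.ofList ic.2) jc.2 ≠ []))).map (fun jc => (ic.1, jc.1)))

-- the (element, cluster-index) stream B feeds to the dict, flattened
def pvFlat (clusters : List (List Int)) : List (Int × Int) :=
  (PySem.List.enumerate clusters).flatMap (fun ic => (PySem.Set.ofList ic.2).map (fun e => (e, ic.1)))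

def pvDict (clusters : List (List Int)) : PySem.Dict Int (List Int) :=
  (pvFlat clusters).foldl (fun d p => d.modify p.1 [] (· ++ [p.2])) PySem.Dict.empty


-- ---- enumerate facts ----
theorem mem_enumerate_iff {α : Type} (xs : List α) (s : Int) (q : Int × α) :
    q ∈ PySem.List.enumerate xs s ↔ ∃ k : Nat, ∃ h : k < xs.length, q = (s + k, xs[k]) := by
  induction xs generalizing s with
  | nil => simp [PySem.List.enumerate]
  | cons x t ih =>
    rw [PySem.List.enumerate_cons]
    constructor
    · intro hq
      rcases List.mem_cons.1 hq with h | h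
      · exact ⟨0, by simp, by simpa using h⟩
      · rcases (ih (s+1)).1 h with ⟨k, hk, hq'⟩
        exact ⟨k+1, by simpa using hk, by simp [hq']; omega⟩
    · rintro ⟨k, hk, rfl⟩
      cases k with
      | zero => simp
      | succ k =>
        refine List.mem_cons.2 (Or.inr ((ih (s+1)).2 ⟨k, by simpa using hk, by simp; omega⟩))

theorem pairwise_fst_enumerate {α : Type} (xs : List α) (s : Int) :
    (PySem.List.enumerate xs s).Pairwise (fun p q => p.1 < q.1) := by
  induction xs generalizing s with
  | nil => simp [PySem.List.enumerate]
  | cons x t ih =>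
    rw [PySem.List.enumerate_cons]
    refine List.pairwise_cons.2 ⟨?_, ih (s+1)⟩
    intro q hq
    rcases (mem_enumerate_iff t (s+1) q).1 hq with ⟨k, hk, rfl⟩
    simp; omega

-- ---- generic fold lemmas ----
theorem mem_foldl_of_step {β γ : Type} (l : List β) (step : List γ → β → List γ)
    (Q : β → γ → Prop) (h : ∀ s x p, p ∈ step s x ↔ p ∈ s ∨ Q x p) :
    ∀ (s : List γ) (p : γ), p ∈ l.foldl step s ↔ p ∈ s ∨ ∃ x ∈ l, Q x p := by
  induction l with
  | nil => simp
  | cons x t ih =>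
    intro s p
    simp only [List.foldl_cons, ih, h]
    constructor
    · rintro (⟨hp | hq⟩ | ⟨y, hy, hq⟩)
      · exact Or.inl hp
      · exact Or.inr ⟨x, by simp, hq⟩
      · exact Or.inr ⟨y, by simp [hy], hq⟩
    · rintro (hp | ⟨y, hy, hq⟩)
      · exact Or.inl (Or.inl hp)
      · rcases List.mem_cons.1 hy with rfl | hy'
        · exact Or.inl (Or.inr hq)
        · exact Or.inr ⟨y, hy', hq⟩

theorem nodup_foldl_of_step {β γ : Type} (l : List β) (step : List γ → β → List γ)
    (h : ∀ s x, s.Nodup → (step s x).Nodup) :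
    ∀ s : List γ, s.Nodup → (l.foldl step s).Nodup := by
  induction l with
  | nil => intro s hs; simpa using hs
  | cons x t ih => intro s hs; exact ih _ (h s x hs)

-- ---- A as a fold over pvPairList ----
theorem pyA_eq_fold' (clusters : List (List Int)) :
    get_idx_sets_to_be_merged_py clusters
      = (pvPairList clusters).foldl (fun acc p => pvMergeStep acc p.1 p.2) [] := by
  unfold get_idx_sets_to_be_merged_py pvPairList
  rw [List.foldl_flatMap]
  apply PySem.List.foldl_congr_mem
  intro acc ic _
  rw [List.foldl_map]
  have hfun : (fun (x : List (List Int)) (y : Int × List Int) => pvMergeStep x (ic.1, y.1).1 (ic.1, y.1).2)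
      = fun acc jc => pvMergeStep acc ic.1 jc.1 := rfl
  rw [hfun]
  have hif : (fun (acc : List (List Int)) (jc : Int × List Int) =>
        if ic.1 < jc.1 then
          if PySem.Set.inter (PySem.Set.ofList ic.2) jc.2 ≠ [] then pvMergeStep acc ic.1 jc.1 else acc
        else acc)
      = fun acc jc =>
        if (fun jc : Int × List Int => decide (ic.1 < jc.1 ∧ PySem.Set.inter (PySem.Set.ofList ic.2) jc.2 ≠ [])) jc = true
          then pvMergeStep acc ic.1 jc.1 else acc := by
    funext acc jc
    by_cases h1 : ic.1 < jc.1 <;> by_cases h2 : PySem.Set.inter (PySem.Set.ofList ic.2) jc.2 ≠ [] <;>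
      simp [h1, h2]
  rw [hif, PySem.List.foldl_if_eq_foldl_filter]

-- ---- the inverted index B builds, as a fold over the flattened (element, index) stream ----
theorem pvDict_eq (clusters : List (List Int)) :
    (PySem.List.enumerate clusters).foldl (fun d ic =>
      (PySem.Set.ofList ic.2).foldl (fun d e => d.modify e [] (· ++ [ic.1])) d) PySem.Dict.empty
    = pvDict clusters := by
  unfold pvDict pvFlat
  rw [List.foldl_flatMap]
  apply PySem.List.foldl_congr_mem
  intro d ic _
  rw [List.foldl_map]

theorem pvDict_keys (clusters : List (List Int)) :
    (pvDict clusters).keys = PySem.Set.ofList ((pvFlat clusters).map (fun p => p.1)) := by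
  unfold pvDict
  rw [PySem.Dict.keys_foldl_modify_key (pvFlat clusters) (fun p => p.1) []
    (fun _ p => (fun x => x ++ [p.2])) PySem.Dict.empty]
  rw [PySem.Dict.keys_empty, PySem.Set.update_nil_left]

theorem pvDict_nodup_keys (clusters : List (List Int)) : (pvDict clusters).keys.Nodup := by
  unfold pvDict
  exact PySem.Dict.nodup_keys_foldl_modify_key (pvFlat clusters) (fun p => p.1) []
    (fun _ p => (fun x => x ++ [p.2])) PySem.Dict.empty PySem.Dict.nodup_keys_empty

theorem filter_beq_of_nodup (s : List Int) (e : Int) (hs : s.Nodup) :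
    s.filter (fun x => x == e) = if e ∈ s then [e] else [] := by
  induction s with
  | nil => simp
  | cons a t ih =>
    rcases List.nodup_cons.1 hs with ⟨ha, ht⟩
    rw [List.filter_cons, ih ht]
    by_cases hae : a = e
    · subst hae
      simp [ha]
    · have h1 : (a == e) = false := by simp [hae]
      simp only [h1, List.mem_cons]
      have : ¬ e = a := fun h => hae h.symm
      simp [this]

theorem aux_flat (l : List (Int × List Int)) (e : Int) :
    (l.flatMap (fun ic => if e ∈ ic.2 then [(e, ic.1)] else [])).map (fun p => p.2)
      = (l.filter (fun ic => decide (e ∈ ic.2))).map (fun p => p.1) := by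
  induction l with
  | nil => simp
  | cons ic t ih =>
    by_cases h : e ∈ ic.2 <;> simp [List.flatMap_cons, h, ih]

theorem pvDict_getD (clusters : List (List Int)) (e : Int) :
    (pvDict clusters).getD e []
      = ((PySem.List.enumerate clusters).filter (fun ic => decide (e ∈ ic.2))).map (fun p => p.1) := by
  unfold pvDict
  rw [PySem.Dict.getD_foldl_modify_append, PySem.Dict.getD_empty, List.nil_append]
  unfold pvFlat
  rw [List.filter_flatMap]
  have hblock : ∀ ic : Int × List Int,
      ((PySem.Set.ofList ic.2).map (fun x => (x, ic.1))).filter (fun p => p.1 == e)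
        = if e ∈ ic.2 then [(e, ic.1)] else [] := by
    intro ic
    rw [List.filter_map]
    have : ((fun p : Int × Int => p.1 == e) ∘ (fun x => (x, ic.1))) = fun x => x == e := rfl
    rw [this, filter_beq_of_nodup _ e (PySem.Set.nodup_ofList ic.2)]
    by_cases h : e ∈ ic.2 <;> simp [PySem.Set.mem_ofList, h]
  calc (List.flatMap (fun a => ((PySem.Set.ofList a.2).map (fun x => (x, a.1))).filter (fun p => p.1 == e)) (PySem.List.enumerate clusters)).map (fun p => p.2)
      = (List.flatMap (fun ic => if e ∈ ic.2 then [(e, ic.1)] else []) (PySem.List.enumerate clusters)).map (fun p => p.2) := by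
        congr 1; exact List.flatMap_congr (by intro a _; exact hblock a)
    _ = _ := aux_flat _ e

theorem pvDict_values (clusters : List (List Int)) :
    (pvDict clusters).values
      = (pvDict clusters).keys.map (fun e =>
          ((PySem.List.enumerate clusters).filter (fun ic => decide (e ∈ ic.2))).map (fun p => p.1)) := by
  rw [PySem.Dict.values_eq_map_keys (pvDict clusters) (pvDict_nodup_keys clusters) []]
  exact List.map_congr_left (fun e _ => pvDict_getD clusters e)

-- ---- the pair set B builds over the dict values ----
def pvPairsOf (vals : List (List Int)) : PySem.Set (Int × Int) :=
  vals.foldl (fun ps idxs =>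
    (PySem.List.enumerate idxs).foldl (fun ps ax =>
      (PySem.List.slice idxs (some (ax.1 + 1)) none).foldl (fun ps y => PySem.Set.add ps (ax.2, y)) ps) ps)
    PySem.Set.empty

def pvQV (idxs : List Int) (p : Int × Int) : Prop :=
  ∃ ax ∈ PySem.List.enumerate idxs, ∃ y ∈ PySem.List.slice idxs (some (ax.1 + 1)) none, p = (ax.2, y)

theorem mem_pvPairsOf (vals : List (List Int)) (p : Int × Int) :
    p ∈ pvPairsOf vals ↔ ∃ idxs ∈ vals, pvQV idxs p := by
  unfold pvPairsOf
  rw [mem_foldl_of_step vals _ pvQV]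
  · simp [PySem.Set.empty]
  · intro s idxs q
    rw [mem_foldl_of_step (PySem.List.enumerate idxs) _
      (fun ax q => ∃ y ∈ PySem.List.slice idxs (some (ax.1 + 1)) none, q = (ax.2, y))]
    · exact Iff.rfl
    · intro s' ax q'
      exact PySem.Set.mem_foldl_add _ (fun y => (ax.2, y)) s' q'

theorem nodup_pvPairsOf (vals : List (List Int)) : (pvPairsOf vals).Nodup := by
  unfold pvPairsOf
  apply nodup_foldl_of_step
  · intro s idxs hs
    apply nodup_foldl_of_step _ _ _ _ hs
    intro s' ax hs'
    apply nodup_foldl_of_step _ _ _ _ hs'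
    intro s'' y hs''
    exact PySem.Set.nodup_add s'' (ax.2, y) hs''
  · simp [PySem.Set.empty]

theorem pvQV_iff (idxs : List Int) (h : idxs.Pairwise (· < ·)) (p : Int × Int) :
    pvQV idxs p ↔ p.1 ∈ idxs ∧ p.2 ∈ idxs ∧ p.1 < p.2 := by
  have hget := List.pairwise_iff_getElem.1 h
  unfold pvQV
  constructor
  · rintro ⟨ax, hax, y, hy, rfl⟩
    rcases (mem_enumerate_iff idxs 0 ax).1 hax with ⟨k, hk, rfl⟩
    simp only [zero_add] at hy ⊢
    have hslice : PySem.List.slice idxs (some ((k : Int) + 1)) none = idxs.drop (k + 1) := by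
      rw [PySem.List.slice_from idxs (by positivity)]
      congr 1
    rw [hslice] at hy
    rcases List.mem_iff_getElem.1 hy with ⟨i, hi, rfl⟩
    rw [List.getElem_drop]
    have hlen : k + 1 + i < idxs.length := by
      have := List.length_drop (i := k + 1) (l := idxs); omega
    refine ⟨List.getElem_mem hk, List.getElem_mem hlen, hget k (k+1+i) hk hlen (by omega)⟩
  · rintro ⟨h1, h2, hlt⟩
    rcases List.mem_iff_getElem.1 h1 with ⟨k, hk, hk'⟩
    rcases List.mem_iff_getElem.1 h2 with ⟨m, hm, hm'⟩
    have hkm : k < m := by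
      by_contra hkm
      rcases Nat.lt_or_ge m k with h' | h'
      · have := hget m k hm hk h'
        rw [hk', hm'] at this
        omega
      · have hkm' : k = m := by omega
        subst hkm'
        rw [hk'] at hm'
        omega
    refine ⟨((k : Int), idxs[k]), (mem_enumerate_iff idxs 0 _).2 ⟨k, hk, by simp⟩, idxs[m], ?_, ?_⟩
    · have hslice : PySem.List.slice idxs (some ((k : Int) + 1)) none = idxs.drop (k + 1) := by
        rw [PySem.List.slice_from idxs (by positivity)]
        congr 1
      rw [hslice]
      rw [List.mem_iff_getElem]
      refine ⟨m - (k + 1), by rw [List.length_drop]; omega, ?_⟩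
      rw [List.getElem_drop]
      congr 1
      omega
    · rw [hk', hm']

theorem pvValues_sorted (clusters : List (List Int)) :
    ∀ idxs ∈ (pvDict clusters).values, idxs.Pairwise (· < ·) := by
  intro idxs hidxs
  rw [pvDict_values] at hidxs
  rcases List.mem_map.1 hidxs with ⟨e, _, rfl⟩
  rw [List.pairwise_map]
  exact ((pairwise_fst_enumerate clusters 0).filter _)

-- membership in B's pair set, in terms of the clusters
theorem mem_pairs_iff (clusters : List (List Int)) (p : Int × Int) :
    p ∈ pvPairsOf (pvDict clusters).values ↔
      ∃ e : Int, (∃ ic ∈ PySem.List.enumerate clusters, e ∈ ic.2 ∧ p.1 = ic.1)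
        ∧ (∃ jc ∈ PySem.List.enumerate clusters, e ∈ jc.2 ∧ p.2 = jc.1) ∧ p.1 < p.2 := by
  rw [mem_pvPairsOf]
  constructor
  · rintro ⟨idxs, hidxs, hqv⟩
    have hsorted := pvValues_sorted clusters idxs hidxs
    rcases (pvQV_iff idxs hsorted p).1 hqv with ⟨h1, h2, hlt⟩
    rw [pvDict_values] at hidxs
    rcases List.mem_map.1 hidxs with ⟨e, _, rfl⟩
    rcases List.mem_map.1 h1 with ⟨ic, hic, hic'⟩
    rcases List.mem_map.1 h2 with ⟨jc, hjc, hjc'⟩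
    rcases List.mem_filter.1 hic with ⟨hicmem, hice⟩
    rcases List.mem_filter.1 hjc with ⟨hjcmem, hjce⟩
    exact ⟨e, ⟨ic, hicmem, by simpa using hice, hic'.symm⟩, ⟨jc, hjcmem, by simpa using hjce, hjc'.symm⟩, hlt⟩
  · rintro ⟨e, ⟨ic, hic, hice, hp1⟩, ⟨jc, hjc, hjce, hp2⟩, hlt⟩
    refine ⟨((PySem.List.enumerate clusters).filter (fun ic => decide (e ∈ ic.2))).map (fun q => q.1), ?_, ?_⟩
    · rw [pvDict_values]
      apply List.mem_map_of_mem
      rw [pvDict_keys, PySem.Set.mem_ofList, List.mem_map]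
      refine ⟨(e, ic.1), ?_, rfl⟩
      unfold pvFlat
      rw [List.mem_flatMap]
      exact ⟨ic, hic, List.mem_map_of_mem (by rw [PySem.Set.mem_ofList]; exact hice)⟩
    · have hsorted : (((PySem.List.enumerate clusters).filter (fun ic => decide (e ∈ ic.2))).map (fun q => q.1)).Pairwise (· < ·) := by
        rw [List.pairwise_map]
        exact ((pairwise_fst_enumerate clusters 0).filter _)
      rw [pvQV_iff _ hsorted]
      refine ⟨?_, ?_, hlt⟩
      · rw [hp1]; exact List.mem_map_of_mem (List.mem_filter.2 ⟨hic, by simpa using hice⟩)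
      · rw [hp2]; exact List.mem_map_of_mem (List.mem_filter.2 ⟨hjc, by simpa using hjce⟩)

theorem mem_pvPairList (clusters : List (List Int)) (p : Int × Int) :
    p ∈ pvPairList clusters ↔
      ∃ ic ∈ PySem.List.enumerate clusters, ∃ jc ∈ PySem.List.enumerate clusters,
        ic.1 < jc.1 ∧ (∃ e : Int, e ∈ ic.2 ∧ e ∈ jc.2) ∧ p = (ic.1, jc.1) := by
  unfold pvPairList
  rw [List.mem_flatMap]
  constructor
  · rintro ⟨ic, hic, hmem⟩
    rcases List.mem_map.1 hmem with ⟨jc, hjc, rfl⟩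
    rcases List.mem_filter.1 hjc with ⟨hjcmem, hcond⟩
    rw [decide_eq_true_eq] at hcond
    rcases hcond with ⟨hltij, hinter⟩
    have : ∃ e : Int, e ∈ ic.2 ∧ e ∈ jc.2 := by
      rcases List.exists_mem_of_ne_nil _ hinter with ⟨e, he⟩
      rcases (PySem.Set.mem_inter _ _ e).1 he with ⟨he1, he2⟩
      exact ⟨e, (PySem.Set.mem_ofList _ e).1 he1, he2⟩
    exact ⟨ic, hic, jc, hjcmem, hltij, this, rfl⟩
  · rintro ⟨ic, hic, jc, hjc, hltij, ⟨e, he1, he2⟩, rfl⟩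
    refine ⟨ic, hic, List.mem_map_of_mem (List.mem_filter.2 ⟨hjc, ?_⟩)⟩
    rw [decide_eq_true_eq]
    refine ⟨hltij, ?_⟩
    intro hnil
    have : e ∈ PySem.Set.inter (PySem.Set.ofList ic.2) jc.2 :=
      (PySem.Set.mem_inter _ _ e).2 ⟨(PySem.Set.mem_ofList _ e).2 he1, he2⟩
    rw [hnil] at this
    simp at this

theorem mem_pairs_eq_mem_pvPairList (clusters : List (List Int)) (p : Int × Int) :
    p ∈ pvPairsOf (pvDict clusters).values ↔ p ∈ pvPairList clusters := by
  rw [mem_pairs_iff, mem_pvPairList]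
  constructor
  · rintro ⟨e, ⟨ic, hic, hice, hp1⟩, ⟨jc, hjc, hjce, hp2⟩, hlt⟩
    refine ⟨ic, hic, jc, hjc, by omega, ⟨e, hice, hjce⟩, ?_⟩
    ext <;> simp [hp1, hp2]
  · rintro ⟨ic, hic, jc, hjc, hltij, ⟨e, he1, he2⟩, rfl⟩
    exact ⟨e, ⟨ic, hic, he1, rfl⟩, ⟨jc, hjc, he2, rfl⟩, hltij⟩

-- every enumerate index is in [0, clusters.length)
theorem enumerate_fst_bounds (clusters : List (List Int)) (q : Int × List Int)
    (hq : q ∈ PySem.List.enumerate clusters) : 0 ≤ q.1 ∧ q.1 < (clusters.length : Int) := by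
  rcases (mem_enumerate_iff clusters 0 q).1 hq with ⟨k, hk, rfl⟩
  simp
  omega

theorem pairwise_key_pvPairList (clusters : List (List Int)) :
    (pvPairList clusters).Pairwise (fun p q =>
      p.1 * (clusters.length : Int) + p.2 < q.1 * (clusters.length : Int) + q.2) := by
  unfold pvPairList
  rw [List.pairwise_flatMap]
  set n : Int := (clusters.length : Int) with hn
  constructor
  · intro ic _
    rw [List.pairwise_map]
    refine List.Pairwise.imp (fun {a b} hab => ?_) ((pairwise_fst_enumerate clusters 0).filter _)
    show ic.1 * n + a.1 < ic.1 * n + b.1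
    omega
  · refine List.Pairwise.imp (fun {ic ic'} hlt => ?_) (pairwise_fst_enumerate clusters 0)
    intro x hx y hy
    rcases List.mem_map.1 hx with ⟨jc, hjc, rfl⟩
    rcases List.mem_map.1 hy with ⟨jc', hjc', rfl⟩
    have hb1 := enumerate_fst_bounds clusters jc (List.mem_filter.1 hjc).1
    have hb2 := enumerate_fst_bounds clusters jc' (List.mem_filter.1 hjc').1
    show ic.1 * n + jc.1 < ic'.1 * n + jc'.1
    have h1 : ic.1 * n + jc.1 < (ic.1 + 1) * n := by nlinarith [hb1.2]
    have h2 : (ic.1 + 1) * n ≤ ic'.1 * n := by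
      apply mul_le_mul_of_nonneg_right (by omega) (by omega)
    nlinarith [hb2.1]

theorem nodup_pvPairList (clusters : List (List Int)) : (pvPairList clusters).Nodup := by
  refine List.Pairwise.imp (fun {a b} hab => ?_) (pairwise_key_pvPairList clusters)
  intro heq
  rw [heq] at hab
  exact lt_irrefl _ hab

theorem sorted_pairs_eq (clusters : List (List Int)) :
    PySem.List.sorted (pvPairsOf (pvDict clusters).values)
      (fun p => p.1 * (clusters.length : Int) + p.2) = pvPairList clusters := by
  apply PySem.List.sorted_eq_of_perm_of_pairwise_lt
  · exact (List.perm_ext_iff_of_nodup (nodup_pvPairList clusters)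
      (nodup_pvPairsOf _)).2 (fun p => (mem_pairs_eq_mem_pvPairList clusters p).symm)
  · exact pairwise_key_pvPairList clusters

-- ===== VERDICT (by name: the statement is the Claim_ definition above) =====
theorem get_idx_sets_to_be_merged_py_spec : Claim_equal_get_idx_sets_to_be_merged_py := by
  intro clusters _
  unfold Spec_get_idx_sets_to_be_merged_py
  rw [pyA_eq_fold']
  show _ = get_idx_sets_to_be_merged_py_alt clusters
  unfold get_idx_sets_to_be_merged_py_alt
  rw [pvDict_eq]
  show _ = (PySem.List.sorted (pvPairsOf (pvDict clusters).values)
      (fun p => p.1 * (clusters.length : Int) + p.2)).foldl (fun acc p => pvMergeStep acc p.1 p.2) []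
  rw [sorted_pairs_eq]
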